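-- pv_equiv track=rewrite | github.com/pypi-data/pypi-mirror-400 | packages/pydough/pydough-1.0.17-py3-none-any.whl/pydough/errors/error_utils.py | _split_identifier
-- ===== SOURCE A (Python) =====
-- from enum import Enum, auto
--
-- def _split_identifier(name: str) -> list[str]:
--     """
--     Split a potentially qualified SQL identifier into parts.
--
--     Behavior:
--     - Dots (.) **outside** quotes/backticks separate parts.
--     - Escaped double quotes "" are allowed inside a quoted name ("...").
--     - Escaped backticks `` are allowed inside a backtick name (`...`).
--     - Dots inside quoted/backtick names are literal characters and do not split.
--     - Returned parts include their surrounding quotes/backticks if present.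
--     (This is intentional, since quoted and unquoted names will be validated differently later.)
--     - Empty parts may be returned for cases like:
--         * ".field"   → ["", "field"]
--         * "schema." → ["schema", ""]
--         * "db..tbl" → ["db", "", "tbl"]
--     (Validation will decide if empty parts are allowed.)
--
--     Notes:
--     - After closing a quoted/backtick identifier, parsing continues in the same token
--     until a dot (.) is seen or the string ends. Quotes themselves do not trigger splitting.
--     - If spaces or other invalid characters appear in a part, the validator will
--     reject that token later.
--
--     Examples:
--         >>> _split_identifier('schema.table')
--         ['schema', 'table']
--
--         >>> _split_identifier('"foo"."bar"')
--         ['"foo"', '"bar"']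
--
--         >>> _split_identifier('db."table.name"')
--         ['db', '"table.name"']
--
--         >>> _split_identifier('`a``b`.`c``d`')
--         ['`a``b`', '`c``d`']
--
--         >>> _split_identifier('.field')
--         ['', 'field']
--
--         >>> _split_identifier('field.')
--         ['field', '']
--     """
--
--     class split_states(Enum):
--         START = auto()
--         UNQUOTED = auto()
--         DOUBLE_QUOTE = auto()
--         BACKTICK = auto()
--
--     parts: list[str] = []
--     start_idx: int = 0
--     state: split_states = split_states.START
--     length = len(name)
--     ii: int = 0
--
--     while ii < length:
--         ch: str = name[ii]
--         match state:
--             case split_states.START: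
--                 match ch:
--                     case '"':
--                         state = split_states.DOUBLE_QUOTE
--                         ii += 1
--                     case "`":
--                         state = split_states.BACKTICK
--                         ii += 1
--                     case _:
--                         state = split_states.UNQUOTED
--             case split_states.UNQUOTED:
--                 if ch == ".":
--                     parts.append(name[start_idx:ii])
--                     start_idx = ii + 1
--                     state = split_states.START
--                 ii += 1
--             case split_states.DOUBLE_QUOTE:
--                 if ch == '"':
--                     if (ii + 1 < length) and (name[ii + 1] == '"'):
--                         ii += 1
--                     else:
--                         state = split_states.UNQUOTED
--                 ii += 1
--             case split_states.BACKTICK: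
--                 if ch == "`":
--                     if (ii + 1 < length) and (name[ii + 1] == "`"):
--                         ii += 1
--                     else:
--                         state = split_states.UNQUOTED
--                 ii += 1
--     parts.append(name[start_idx:ii])
--     return parts
-- ===== SOURCE B (Python) =====
-- def _split_identifier(name: str) -> list[str]:
--     """Split a qualified SQL identifier on dots that are outside quoted/backtick
--     sections, keeping the quotes in the returned parts.  Token-at-a-time scan
--     instead of a state machine."""
--     parts: list[str] = []
--     n = len(name)
--     i = 0
--     while True:
--         start = i
--         # a quote/backtick is special only at the very start of a token
--         if i < n and name[i] in ('"', "`"):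
--             q = name[i]
--             i += 1
--             while i < n:
--                 if name[i] == q:
--                     if i + 1 < n and name[i + 1] == q:
--                         i += 2  # doubled quote: escaped, stay inside
--                         continue
--                     i += 1      # closing quote
--                     break
--                 i += 1
--         # rest of the token: everything up to the next dot is literal
--         while i < n and name[i] != ".":
--             i += 1
--         parts.append(name[start:i])
--         if i < n and name[i] == ".":
--             i += 1
--         else:
--             break
--     return parts
-- ===== Notes on version B (the rewrite author's own statement) =====
-- stated objective: simpler
-- what changed: Replaces the four-state enum state machine with a token-at-a-time scan: an outer loop over token starts with two small inner scans (skip a quoted prefix with doubled-quote escapes, then advance to the next unquoted dot), so no state variable or enum is needed.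
import Mathlib
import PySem

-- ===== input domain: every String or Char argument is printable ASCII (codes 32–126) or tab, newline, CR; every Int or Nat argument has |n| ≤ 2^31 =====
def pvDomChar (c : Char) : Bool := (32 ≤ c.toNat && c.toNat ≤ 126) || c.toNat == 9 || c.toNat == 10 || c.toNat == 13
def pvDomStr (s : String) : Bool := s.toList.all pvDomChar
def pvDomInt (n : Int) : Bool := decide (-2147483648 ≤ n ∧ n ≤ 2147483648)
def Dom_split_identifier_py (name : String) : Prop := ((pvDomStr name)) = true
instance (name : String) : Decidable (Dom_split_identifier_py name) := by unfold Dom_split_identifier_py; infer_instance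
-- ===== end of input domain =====

-- B is simpler: it drops A's enum state machine for an outer loop over token starts with two inner scans.
-- ===== PORT A =====
-- A's `split_states` enum
inductive AState : Type
  | start | unquoted | dquote | btick
deriving DecidableEq, Repr

-- A's while loop: parts/start_idx/ii/state are exactly A's variables; name[start_idx:ii] is PySem slice
def loopA (s : List Char) (parts : List (List Char)) (start_idx ii : Nat) (st : AState) :
    List (List Char) :=
  if h : ii < s.length then
    let ch := s[ii]
    match st with
    | .start =>
        if ch = '"' then loopA s parts start_idx (ii + 1) .dquote
        else if ch = '`' then loopA s parts start_idx (ii + 1) .btick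
        else loopA s parts start_idx ii .unquoted
    | .unquoted =>
        if ch = '.' then
          loopA s (parts ++ [PySem.List.slice s (some (start_idx : Int)) (some (ii : Int))])
            (ii + 1) (ii + 1) .start
        else loopA s parts start_idx (ii + 1) .unquoted
    | .dquote =>
        if ch = '"' then
          if ii + 1 < s.length ∧ s[ii + 1]! = '"' then loopA s parts start_idx (ii + 2) .dquote
          else loopA s parts start_idx (ii + 1) .unquoted
        else loopA s parts start_idx (ii + 1) .dquote
    | .btick =>
        if ch = '`' then
          if ii + 1 < s.length ∧ s[ii + 1]! = '`' then loopA s parts start_idx (ii + 2) .btick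
          else loopA s parts start_idx (ii + 1) .unquoted
        else loopA s parts start_idx (ii + 1) .btick
  else
    parts ++ [PySem.List.slice s (some (start_idx : Int)) (some (ii : Int))]
termination_by 2 * (s.length - ii) + (if st = .start then 1 else 0)
decreasing_by all_goals simp_all <;> omega

def split_identifier_py (name : String) : List String :=
  (loopA name.toList [] 0 0 .start).map String.ofList

-- ===== PORT B =====
-- B's inner quoted scan: position just past the closing quote (doubled quote = escape), or the end
def qEnd (s : List Char) (q : Char) (i : Nat) : Nat :=
  if h : i < s.length then
    if s[i] = q then
      if i + 1 < s.length ∧ s[i + 1]! = q then qEnd s q (i + 2) else i + 1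
    else qEnd s q (i + 1)
  else i
termination_by s.length - i
decreasing_by all_goals omega

-- B's second inner scan: position of the next dot at or after i, or the end
def uEnd (s : List Char) (i : Nat) : Nat :=
  if h : i < s.length then
    if s[i] = '.' then i else uEnd s (i + 1)
  else i
termination_by s.length - i
decreasing_by omega

theorem qEnd_ge (s : List Char) (q : Char) (i : Nat) : i ≤ qEnd s q i := by
  fun_induction qEnd s q i with
  | case1 => omega
  | case2 => omega
  | case3 => omega
  | case4 => omega

theorem uEnd_ge (s : List Char) (i : Nat) : i ≤ uEnd s i := by
  fun_induction uEnd s i with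
  | case1 => omega
  | case2 => omega
  | case3 => omega

-- B's quoted-prefix step: if the token starts with a quote/backtick, skip to just past its close
def jB (s : List Char) (i : Nat) : Nat :=
  if h : i < s.length then
    if s[i] = '"' then qEnd s '"' (i + 1)
    else if s[i] = '`' then qEnd s '`' (i + 1)
    else i
  else i

theorem jB_ge (s : List Char) (i : Nat) : i ≤ jB s i := by
  unfold jB
  split
  · split
    · exact le_trans (by omega) (qEnd_ge s '"' (i + 1))
    · split
      · exact le_trans (by omega) (qEnd_ge s '`' (i + 1))
      · omega
  · omega

-- B's outer loop over token starts; i is B's index, uEnd s (jB s i) is where the token ends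
def loopB (s : List Char) (i : Nat) : List (List Char) :=
  if h : uEnd s (jB s i) < s.length then
    if s[uEnd s (jB s i)] = '.' then
      PySem.List.slice s (some (i : Int)) (some (uEnd s (jB s i) : Int)) :: loopB s (uEnd s (jB s i) + 1)
    else [PySem.List.slice s (some (i : Int)) (some (uEnd s (jB s i) : Int))]
  else [PySem.List.slice s (some (i : Int)) (some (uEnd s (jB s i) : Int))]
termination_by s.length - i
decreasing_by
  have h1 : i ≤ jB s i := jB_ge s i
  have h2 : jB s i ≤ uEnd s (jB s i) := uEnd_ge s (jB s i)
  omega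

def split_identifier_py_alt (name : String) : List String :=
  (loopB name.toList 0).map String.ofList

-- ===== PRECONDITION & SPEC =====
def Spec_split_identifier_py (name : String) (out : List String) : Prop := out = split_identifier_py_alt name
instance (name : String) (out : List String) : Decidable (Spec_split_identifier_py name out) := by unfold Spec_split_identifier_py; infer_instance

-- ===== CLAIM (what is proved, stated in full; the proofs are below) =====
def Claim_equal_split_identifier_py : Prop := ∀ (name : String), Dom_split_identifier_py name → Spec_split_identifier_py name (split_identifier_py name)

-- ===== LEMMAS AND PROOFS =====

theorem qEnd_le (s : List Char) (q : Char) (i : Nat) (h : i ≤ s.length) :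
    qEnd s q i ≤ s.length := by
  fun_induction qEnd s q i with
  | case1 i hi hq hesc ih => exact ih (by omega)
  | case2 i hi hq hesc => omega
  | case3 i hi hq ih => exact ih (by omega)
  | case4 i hi => omega

theorem uEnd_le (s : List Char) (i : Nat) (h : i ≤ s.length) : uEnd s i ≤ s.length := by
  fun_induction uEnd s i with
  | case1 i hi hdot => omega
  | case2 i hi hdot ih => exact ih (by omega)
  | case3 i hi => omega

theorem uEnd_dot (s : List Char) (i : Nat) (h : uEnd s i < s.length) :
    s[uEnd s i] = '.' := by
  fun_induction uEnd s i with
  | case1 i hi hdot => simpa using hdot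
  | case2 i hi hdot ih => exact ih h
  | case3 i hi => omega

theorem uEnd_end (s : List Char) (i : Nat) (h : s.length ≤ i) : uEnd s i = i := by
  fun_induction uEnd s i with
  | case1 i hi hdot => omega
  | case2 i hi hdot ih => omega
  | case3 i hi => rfl

theorem jB_le (s : List Char) (i : Nat) (h : i ≤ s.length) : jB s i ≤ s.length := by
  unfold jB
  split
  · split
    · exact qEnd_le s '"' (i + 1) (by omega)
    · split
      · exact qEnd_le s '`' (i + 1) (by omega)
      · omega
  · omega

-- A's UNQUOTED run: scans to the next dot (B's uEnd), appends the slice, restarts or ends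
theorem loopA_unquoted (s : List Char) (parts : List (List Char)) (start ii : Nat)
    (h : ii ≤ s.length) :
    loopA s parts start ii .unquoted =
      if uEnd s ii < s.length then
        loopA s (parts ++ [PySem.List.slice s (some (start : Int)) (some (uEnd s ii : Int))])
          (uEnd s ii + 1) (uEnd s ii + 1) .start
      else parts ++ [PySem.List.slice s (some (start : Int)) (some (uEnd s ii : Int))] := by
  fun_induction uEnd s ii with
  | case1 i hi hdot =>
      rw [loopA]
      simp [hi, hdot]
  | case2 i hi hdot ih =>
      rw [loopA]
      simp only [hi, dif_pos]
      rw [if_neg hdot]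
      exact ih (by omega)
  | case3 i hi =>
      have hie : i = s.length := by omega
      rw [loopA]
      simp [hie]

-- A's DOUBLE_QUOTE/BACKTICK run: scans to the closing quote (B's qEnd) then continues UNQUOTED
theorem loopA_dquote (s : List Char) (parts : List (List Char)) (start ii : Nat)
    (h : ii ≤ s.length) :
    loopA s parts start ii .dquote = loopA s parts start (qEnd s '"' ii) .unquoted := by
  fun_induction qEnd s '"' ii with
  | case1 i hi hq hesc ih =>
      rw [loopA]
      simp only [hi, dif_pos]
      rw [if_pos hq, if_pos hesc]
      exact ih (by omega)
  | case2 i hi hq hesc =>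
      rw [loopA]
      simp only [hi, dif_pos]
      rw [if_pos hq, if_neg hesc]
  | case3 i hi hq ih =>
      rw [loopA]
      simp only [hi, dif_pos]
      rw [if_neg hq]
      exact ih (by omega)
  | case4 i hi =>
      have hie : i = s.length := by omega
      conv_lhs => rw [loopA]
      conv_rhs => rw [loopA]
      simp [hi]

theorem loopA_btick (s : List Char) (parts : List (List Char)) (start ii : Nat)
    (h : ii ≤ s.length) :
    loopA s parts start ii .btick = loopA s parts start (qEnd s '`' ii) .unquoted := by
  fun_induction qEnd s '`' ii with
  | case1 i hi hq hesc ih =>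
      rw [loopA]
      simp only [hi, dif_pos]
      rw [if_pos hq, if_pos hesc]
      exact ih (by omega)
  | case2 i hi hq hesc =>
      rw [loopA]
      simp only [hi, dif_pos]
      rw [if_pos hq, if_neg hesc]
  | case3 i hi hq ih =>
      rw [loopA]
      simp only [hi, dif_pos]
      rw [if_neg hq]
      exact ih (by omega)
  | case4 i hi =>
      have hie : i = s.length := by omega
      conv_lhs => rw [loopA]
      conv_rhs => rw [loopA]
      simp [hi]

-- A's START step lands in UNQUOTED at B's jB position
theorem loopA_start_step (s : List Char) (parts : List (List Char)) (i : Nat)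
    (hi : i < s.length) :
    loopA s parts i i .start = loopA s parts i (jB s i) .unquoted := by
  rw [loopA]
  simp only [hi, dif_pos]
  unfold jB
  simp only [hi, dif_pos]
  by_cases hq : s[i] = '"'
  · rw [if_pos hq, if_pos hq]
    exact loopA_dquote s parts i (i + 1) (by omega)
  · rw [if_neg hq, if_neg hq]
    by_cases hb : s[i] = '`'
    · rw [if_pos hb, if_pos hb]
      exact loopA_btick s parts i (i + 1) (by omega)
    · rw [if_neg hb, if_neg hb]

-- main correspondence: A restarted at token start i = B's outer loop from i
theorem loopA_eq_loopB (s : List Char) (i : Nat) (h : i ≤ s.length) (parts : List (List Char)) :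
    loopA s parts i i .start = parts ++ loopB s i := by
  generalize hfuel : s.length - i = fuel
  induction fuel using Nat.strong_induction_on generalizing i parts with
  | _ fuel ih =>
    rw [loopB]
    by_cases hi : i < s.length
    · have hij : i ≤ jB s i := jB_ge s i
      have hjlen : jB s i ≤ s.length := jB_le s i h
      rw [loopA_start_step s parts i hi, loopA_unquoted s parts i (jB s i) hjlen]
      have hjk : jB s i ≤ uEnd s (jB s i) := uEnd_ge s (jB s i)
      have hklen : uEnd s (jB s i) ≤ s.length := uEnd_le s (jB s i) hjlen
      by_cases hkl : uEnd s (jB s i) < s.length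
      · rw [if_pos hkl]
        simp only [hkl, dif_pos]
        rw [if_pos (uEnd_dot s (jB s i) hkl)]
        rw [ih (s.length - (uEnd s (jB s i) + 1)) (by omega) (uEnd s (jB s i) + 1) (by omega)
              (parts ++ [PySem.List.slice s (some (i : Int)) (some (uEnd s (jB s i) : Int))]) rfl]
        simp
      · rw [if_neg hkl]
        simp only [hkl, dif_neg, not_false_iff]
    · have hie : i = s.length := by omega
      subst hie
      have hui : uEnd s (jB s s.length) = s.length := by
        rw [show jB s s.length = s.length by unfold jB; simp]
        exact uEnd_end s s.length le_rfl
      rw [loopA]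
      simp [hui]

-- ===== VERDICT (by name: the statement is the Claim_ definition above) =====
theorem split_identifier_py_spec : Claim_equal_split_identifier_py := by
  intro name _
  unfold Spec_split_identifier_py split_identifier_py split_identifier_py_alt
  rw [loopA_eq_loopB name.toList 0 (by omega) []]
  simp
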